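-- pv_equiv track=rewrite | github.com/smithclay/strudel-rlm | rlm_strudel/rlm_runner.py | identify_flagged_sections
-- ===== SOURCE A (Python) =====
-- def identify_flagged_sections(revisions: list[str]) -> set[str]:
--     """Scan revision strings for section names. Returns set of flagged sections.
--
--     Defaults to {"verse", "chorus"} if no sections explicitly named.
--     """
--     section_names = {"intro", "verse", "chorus", "bridge", "outro", "buildup", "drop", "breakdown"}
--     flagged: set[str] = set()
--     for rev in revisions:
--         rev_lower = rev.lower()
--         for name in section_names:
--             if name in rev_lower:
--                 flagged.add(name)
--     if not flagged:
--         flagged = {"verse", "chorus"}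
--     return flagged
-- ===== SOURCE B (Python) =====
-- def identify_flagged_sections(revisions: list[str]) -> set[str]:
--     """Scan revision strings for section names. Returns set of flagged sections.
--
--     Defaults to {"verse", "chorus"} if no sections explicitly named.
--     """
--     # Index the section names by first letter, then walk each revision once,
--     # character by character, dispatching only to the names that can start there.
--     by_first = {
--         "i": ["intro"],
--         "v": ["verse"],
--         "c": ["chorus"],
--         "b": ["bridge", "buildup", "breakdown"],
--         "o": ["outro"],
--         "d": ["drop"],
--     }
--     flagged: set[str] = set()
--     for rev in revisions:
--         text = rev.lower()
--         for i, ch in enumerate(text):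
--             for name in by_first.get(ch, []):
--                 if text.startswith(name, i):
--                     flagged.add(name)
--     return flagged or {"verse", "chorus"}
-- ===== Notes on version B (the rewrite author's own statement) =====
-- stated objective: alternative
-- what changed: Instead of testing each of the 8 section names as a substring of every revision, B builds a dict indexing the names by their first letter and walks each lowercased revision once character by character, testing startswith only for the names dispatched by the current character.
import Mathlib
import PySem

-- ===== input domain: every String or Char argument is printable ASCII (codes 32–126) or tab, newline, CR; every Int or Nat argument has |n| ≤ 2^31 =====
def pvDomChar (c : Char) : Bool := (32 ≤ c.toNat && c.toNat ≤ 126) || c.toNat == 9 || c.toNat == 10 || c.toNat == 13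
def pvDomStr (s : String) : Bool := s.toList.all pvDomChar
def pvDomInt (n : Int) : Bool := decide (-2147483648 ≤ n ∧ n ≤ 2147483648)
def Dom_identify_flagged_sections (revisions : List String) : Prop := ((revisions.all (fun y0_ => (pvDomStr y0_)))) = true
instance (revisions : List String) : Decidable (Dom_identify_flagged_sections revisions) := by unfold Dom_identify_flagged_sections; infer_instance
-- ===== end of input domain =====

-- B replaces A's per-name substring scan of every revision with a first-letter index
-- (a dict from initial character to candidate names) and a single left-to-right walk
-- of each lowercased revision, testing only the names that can start at each position
-- (objective: alternative decomposition, same asymptotic cost).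
-- Python set iteration order is unspecified (hash-based); both ports present the returned
-- set in section_names literal order, a faithful representative (sets are compared as
-- finite sets).


-- the Python set literal of section names, in source order
def pvSectionNames : List String :=
  ["intro", "verse", "chorus", "bridge", "outro", "buildup", "drop", "breakdown"]

-- ===== PORT A =====
def identify_flagged_sections (revisions : List String) : List String :=
  let flagged : PySem.Set String :=
    revisions.foldl (fun flagged rev =>
      let revLower := PySem.Str.lower rev
      pvSectionNames.foldl (fun flagged name =>
        if PySem.Str.isIn name revLower then PySem.Set.add flagged name else flagged) flagged)
      PySem.Set.empty
  let flagged : PySem.Set String :=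
    if flagged.isEmpty then PySem.Set.ofList ["verse", "chorus"] else flagged
  -- Python set iteration order is unspecified: present the set in section_names order
  pvSectionNames.filter (fun n => PySem.Set.contains flagged n)

-- ===== PORT B =====
-- Source B's by_first dict; its one-character string keys are Chars here (Python iterates a
-- string as one-character strings, which the type convention renders as Char)
def pvByFirst : PySem.Dict Char (List String) :=
  PySem.Dict.ofList [('i', ["intro"]), ('v', ["verse"]), ('c', ["chorus"]),
    ('b', ["bridge", "buildup", "breakdown"]), ('o', ["outro"]), ('d', ["drop"])]

def identify_flagged_sections_alt (revisions : List String) : List String :=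
  let flagged : PySem.Set String :=
    revisions.foldl (fun flagged rev =>
      let text := (PySem.Str.lower rev).toList
      (PySem.List.enumerate text).foldl (fun flagged p =>
        (PySem.Dict.getD pvByFirst p.2 []).foldl (fun flagged name =>
          -- text.startswith(name, i): the enumerate index p.1 is ≥ 0, so .toNat is exact
          if PySem.Chars.startswith (text.drop p.1.toNat) name.toList
          then PySem.Set.add flagged name else flagged) flagged) flagged)
      PySem.Set.empty
  let flagged : PySem.Set String :=
    if flagged.isEmpty then PySem.Set.ofList ["verse", "chorus"] else flagged
  -- Python set iteration order is unspecified: present the set in section_names order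
  pvSectionNames.filter (fun n => PySem.Set.contains flagged n)

-- ===== PRECONDITION & SPEC =====
def Spec_identify_flagged_sections (revisions : List String) (out : List String) : Prop := out = identify_flagged_sections_alt revisions
instance (revisions : List String) (out : List String) : Decidable (Spec_identify_flagged_sections revisions out) := by unfold Spec_identify_flagged_sections; infer_instance

-- ===== CLAIM (what is proved, stated in full; the proofs are below) =====
def Claim_equal_identify_flagged_sections : Prop := ∀ (revisions : List String), Dom_identify_flagged_sections revisions → Spec_identify_flagged_sections revisions (identify_flagged_sections revisions)

-- ===== LEMMAS AND PROOFS =====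

-- membership after an add-if fold over a list of names (A's inner loop, B's innermost loop)
theorem pv_inner_mem (names : List String) (p : String → Bool) (acc : PySem.Set String) (n : String) :
    n ∈ names.foldl (fun fl name => if p name then PySem.Set.add fl name else fl) acc ↔
      n ∈ acc ∨ (n ∈ names ∧ p n = true) := by
  induction names generalizing acc with
  | nil => simp
  | cons x xs ih =>
    simp only [List.foldl_cons]
    by_cases hx : p x = true
    · rw [if_pos hx, ih]
      simp only [PySem.Set.mem_add, List.mem_cons]
      constructor
      · rintro (⟨h | h⟩ | ⟨h1, h2⟩)
        · exact Or.inl h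
        · subst h; exact Or.inr ⟨Or.inl rfl, hx⟩
        · exact Or.inr ⟨Or.inr h1, h2⟩
      · rintro (h | ⟨h1 | h1, h2⟩)
        · exact Or.inl (Or.inl h)
        · subst h1; exact Or.inl (Or.inr rfl)
        · exact Or.inr ⟨h1, h2⟩
    · rw [if_neg hx, ih]
      simp only [List.mem_cons]
      constructor
      · rintro (h | ⟨h1, h2⟩)
        · exact Or.inl h
        · exact Or.inr ⟨Or.inr h1, h2⟩
      · rintro (h | ⟨h1 | h1, h2⟩)
        · exact Or.inl h
        · subst h1; exact absurd h2 hx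
        · exact Or.inr ⟨h1, h2⟩

-- a fold whose step's membership is "old ∨ Q x" accumulates "∃ x ∈ L, Q x"
theorem pv_mem_foldl_step {α : Type} (L : List α) (step : PySem.Set String → α → PySem.Set String)
    (Q : α → String → Prop)
    (h : ∀ acc x n, n ∈ step acc x ↔ n ∈ acc ∨ Q x n) (acc : PySem.Set String) (n : String) :
    n ∈ L.foldl step acc ↔ n ∈ acc ∨ ∃ x ∈ L, Q x n := by
  induction L generalizing acc with
  | nil => simp
  | cons x xs ih =>
    simp only [List.foldl_cons, List.mem_cons]
    rw [ih, h]
    constructor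
    · rintro ((h1 | h1) | ⟨y, hy, h2⟩)
      · exact Or.inl h1
      · exact Or.inr ⟨x, Or.inl rfl, h1⟩
      · exact Or.inr ⟨y, Or.inr hy, h2⟩
    · rintro (h1 | ⟨y, (hy | hy), h2⟩)
      · exact Or.inl (Or.inl h1)
      · subst hy; exact Or.inl (Or.inr h2)
      · exact Or.inr ⟨y, hy, h2⟩

-- every candidate the first-letter index can ever hand out is a section name
theorem pv_cand_names (c : Char) (n : String) (h : n ∈ PySem.Dict.getD pvByFirst c []) :
    n ∈ pvSectionNames := by
  have e : pvByFirst = PySem.Dict.mk [('i', ["intro"]), ('v', ["verse"]), ('c', ["chorus"]),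
      ('b', ["bridge", "buildup", "breakdown"]), ('o', ["outro"]), ('d', ["drop"])] := by decide
  rw [e, PySem.Dict.getD_eq_get?_getD] at h
  simp only [PySem.Dict.get?_mk_cons] at h
  split_ifs at h <;> simp_all [pvSectionNames] <;> tauto

-- a name whose first letter indexes it is found by the scan wherever it occurs as an infix
theorem pv_scan_of_infix (text : List Char) (n : String) (c : Char)
    (hhd : n.toList.head? = some c) (hcand : n ∈ PySem.Dict.getD pvByFirst c [])
    (h : n.toList <:+: text) :
    ∃ p ∈ PySem.List.enumerate text, n ∈ PySem.Dict.getD pvByFirst p.2 [] ∧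
      PySem.Chars.startswith (text.drop p.1.toNat) n.toList = true := by
  obtain ⟨s, t, hst⟩ := h
  obtain ⟨c', rest, hcons⟩ : ∃ c' rest, n.toList = c' :: rest := by
    cases hn : n.toList with
    | nil => rw [hn] at hhd; simp at hhd
    | cons a b => exact ⟨a, b, rfl⟩
  have hc : c' = c := by rw [hcons] at hhd; simpa using hhd
  rw [hc] at hcons
  have hdrop : text.drop s.length = n.toList ++ t := by
    rw [← hst, List.append_assoc, List.drop_left]
  have hlen : s.length < text.length := by
    have h1 : (text.drop s.length).length = text.length - s.length := List.length_drop ..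
    rw [hdrop] at h1
    rw [hcons] at h1
    simp at h1
    omega
  have hget : text[s.length] = c := by
    have h0 : (text.drop s.length)[0]? = text[s.length]? := by
      rw [List.getElem?_drop]; simp
    rw [hdrop, hcons] at h0
    simp at h0
    have := List.getElem?_eq_getElem hlen
    rw [this] at h0
    exact (Option.some_injective _ h0.symm)
  refine ⟨((s.length : Int), c), ?_, ?_, ?_⟩
  · rw [PySem.List.mem_enumerate_iff]
    exact ⟨s.length, hlen, by simp [hget]⟩
  · exact hcand
  · simp only [Int.toNat_natCast]
    rw [PySem.Chars.startswith_iff, hdrop]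
    exact List.prefix_append n.toList t
-- B's per-revision scan finds a section name iff it occurs in the lowercased revision
theorem pv_scan_iff (n : String) (hn : n ∈ pvSectionNames) (text : List Char) :
    (∃ p ∈ PySem.List.enumerate text, n ∈ PySem.Dict.getD pvByFirst p.2 [] ∧
        PySem.Chars.startswith (text.drop p.1.toNat) n.toList = true) ↔
      PySem.Chars.isIn n.toList text = true := by
  constructor
  · rintro ⟨p, _hp, _hc, hsw⟩
    rw [← PySem.Chars.exists_prefix_drop_iff_isIn]
    exact ⟨p.1.toNat, (PySem.Chars.startswith_iff _ _).mp hsw⟩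
  · intro hin
    have hinf : n.toList <:+: text := (PySem.Chars.isIn_iff_infix _ _).mp hin
    simp only [pvSectionNames, List.mem_cons, List.not_mem_nil, or_false] at hn
    rcases hn with rfl | rfl | rfl | rfl | rfl | rfl | rfl | rfl <;>
      [exact pv_scan_of_infix text _ 'i' (by decide) (by decide) hinf;
       exact pv_scan_of_infix text _ 'v' (by decide) (by decide) hinf;
       exact pv_scan_of_infix text _ 'c' (by decide) (by decide) hinf;
       exact pv_scan_of_infix text _ 'b' (by decide) (by decide) hinf;
       exact pv_scan_of_infix text _ 'o' (by decide) (by decide) hinf;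
       exact pv_scan_of_infix text _ 'b' (by decide) (by decide) hinf;
       exact pv_scan_of_infix text _ 'd' (by decide) (by decide) hinf;
       exact pv_scan_of_infix text _ 'b' (by decide) (by decide) hinf]

-- ===== VERDICT (by name: the statement is the Claim_ definition above) =====
theorem identify_flagged_sections_spec : Claim_equal_identify_flagged_sections := by
  intro revisions _hd
  unfold Spec_identify_flagged_sections
  simp only [identify_flagged_sections, identify_flagged_sections_alt]
  set FA := revisions.foldl (fun flagged rev =>
      pvSectionNames.foldl (fun flagged name =>
        if PySem.Str.isIn name (PySem.Str.lower rev) then PySem.Set.add flagged name else flagged)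
        flagged) PySem.Set.empty with hFA
  set FB := revisions.foldl (fun flagged rev =>
      (PySem.List.enumerate (PySem.Str.lower rev).toList).foldl (fun flagged p =>
        (PySem.Dict.getD pvByFirst p.2 []).foldl (fun flagged name =>
          if PySem.Chars.startswith (((PySem.Str.lower rev).toList).drop p.1.toNat) name.toList
          then PySem.Set.add flagged name else flagged) flagged) flagged) PySem.Set.empty with hFB
  have hmemA : ∀ nn : String, nn ∈ FA ↔
      (nn ∈ pvSectionNames ∧ ∃ r ∈ revisions, PySem.Str.isIn nn (PySem.Str.lower r) = true) := by
    intro nn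
    rw [hFA, pv_mem_foldl_step _ _
      (fun (rev : String) (m : String) => m ∈ pvSectionNames ∧ PySem.Str.isIn m (PySem.Str.lower rev) = true)
      (fun acc rev m => pv_inner_mem pvSectionNames _ acc m)]
    simp only [PySem.Set.empty]
    constructor
    · rintro (h | ⟨r, hr, h1, h2⟩)
      · simp at h
      · exact ⟨h1, r, hr, h2⟩
    · rintro ⟨h1, r, hr, h2⟩
      exact Or.inr ⟨r, hr, h1, h2⟩
  have hmemB : ∀ nn : String, nn ∈ FB ↔
      (nn ∈ pvSectionNames ∧ ∃ r ∈ revisions, PySem.Str.isIn nn (PySem.Str.lower r) = true) := by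
    intro nn
    rw [hFB, pv_mem_foldl_step _ _
      (fun (rev : String) (m : String) => ∃ p ∈ PySem.List.enumerate (PySem.Str.lower rev).toList,
          m ∈ PySem.Dict.getD pvByFirst p.2 [] ∧
          PySem.Chars.startswith (((PySem.Str.lower rev).toList).drop p.1.toNat) m.toList = true)
      (fun acc rev m => pv_mem_foldl_step _ _
        (fun (p : Int × Char) (mm : String) => mm ∈ PySem.Dict.getD pvByFirst p.2 [] ∧
          PySem.Chars.startswith (((PySem.Str.lower rev).toList).drop p.1.toNat) mm.toList = true)
        (fun acc' p mm => pv_inner_mem _ _ acc' mm) acc m)]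
    simp only [PySem.Set.empty]
    constructor
    · rintro (h | ⟨r, hr, p, hp, hc, hsw⟩)
      · simp at h
      · refine ⟨pv_cand_names p.2 nn hc, r, hr, ?_⟩
        rw [PySem.Str.isIn_iff_infix, ← PySem.Chars.isIn_iff_infix]
        exact (pv_scan_iff nn (pv_cand_names p.2 nn hc) _).mp ⟨p, hp, hc, hsw⟩
    · rintro ⟨h1, r, hr, h2⟩
      refine Or.inr ⟨r, hr, ?_⟩
      apply (pv_scan_iff nn h1 _).mpr
      rw [PySem.Chars.isIn_iff_infix, ← PySem.Str.isIn_iff_infix]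
      exact h2
  have hsame : ∀ nn : String, nn ∈ FA ↔ nn ∈ FB := fun nn => (hmemA nn).trans (hmemB nn).symm
  have hempiff : FA.isEmpty = FB.isEmpty := by
    cases hA : FA.isEmpty <;> cases hB : FB.isEmpty <;> try rfl
    · exfalso
      have hBnil : FB = [] := List.isEmpty_iff.mp hB
      have hAne : FA ≠ [] := by intro h; rw [h] at hA; simp at hA
      obtain ⟨n0, hn0⟩ := List.exists_mem_of_ne_nil FA hAne
      have h0 := (hsame n0).mp hn0
      rw [hBnil] at h0; simp at h0
    · exfalso
      have hAnil : FA = [] := List.isEmpty_iff.mp hA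
      have hBne : FB ≠ [] := by intro h; rw [h] at hB; simp at hB
      obtain ⟨n0, hn0⟩ := List.exists_mem_of_ne_nil FB hBne
      have h0 := (hsame n0).mpr hn0
      rw [hAnil] at h0; simp at h0
  rw [← hempiff]
  by_cases hemp : FA.isEmpty = true
  · simp only [hemp, if_pos]
  · have hempf : FA.isEmpty = false := by
      cases h : FA.isEmpty
      · rfl
      · exact absurd h hemp
    simp only [hempf, Bool.false_eq_true, if_false]
    apply List.filter_congr
    intro nn _hnn
    apply Bool.eq_iff_iff.mpr
    rw [PySem.Set.contains_iff, PySem.Set.contains_iff]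
    exact hsame nn
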